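-- pv_equiv track=rewrite | github.com/99pswork/cause-list-laywer | causelist/captcha.py | _words_to_digits
-- ===== SOURCE A (Python) =====
-- def _words_to_digits(text: str) -> str:
--     """Convert spoken digit words to actual digits.
--
--     The captcha audio spells out digits individually, but Google Speech API
--     sometimes transcribes them as words (e.g., "six" -> "sex", "four" -> "for").
--     """
--     word_map = {
--         "zero": "0", "oh": "0",
--         "one": "1", "won": "1",
--         "two": "2", "to": "2", "too": "2",
--         "three": "3", "tree": "3",
--         "four": "4", "for": "4",
--         "five": "5",
--         "six": "6", "sex": "6",
--         "seven": "7",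
--         "eight": "8", "ate": "8",
--         "nine": "9",
--     }
--     # Split on spaces and convert word by word
--     parts = text.lower().strip().split()
--     result = []
--     for part in parts:
--         if part in word_map:
--             result.append(word_map[part])
--         elif part.isdigit():
--             result.append(part)
--         else:
--             # Try to extract digits from mixed strings like "sex3823" -> "63823"
--             converted = ""
--             i = 0
--             while i < len(part):
--                 matched = False
--                 # Try longest word match first
--                 for word, digit in sorted(word_map.items(), key=lambda x: -len(x[0])):
--                     if part[i:].startswith(word):
--                         converted += digit
--                         i += len(word)
--                         matched = True
--                         break
--                 if not matched:
--                     if part[i].isdigit():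
--                         converted += part[i]
--                     i += 1
--             result.append(converted)
--     return "".join(result)
-- ===== SOURCE B (Python) =====
-- # B: a character trie (flat node table) built once from the word map; each token is
-- # converted by one greedy trie walk per position tracking the last terminal node,
-- # which replaces A's per-token fast paths and its inner scan over the sorted word list.
-- _WORD_MAP = {
--     "zero": "0", "oh": "0",
--     "one": "1", "won": "1",
--     "two": "2", "to": "2", "too": "2",
--     "three": "3", "tree": "3",
--     "four": "4", "for": "4",
--     "five": "5",
--     "six": "6", "sex": "6",
--     "seven": "7",
--     "eight": "8", "ate": "8",
--     "nine": "9",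
-- }
--
--
-- def _build_trie():
--     # nodes[k] = (children: char -> node index, terminal digit or None)
--     nodes = [({}, None)]
--     for word, digit in _WORD_MAP.items():
--         cur = 0
--         for ch in word:
--             children, term = nodes[cur]
--             nxt = children.get(ch)
--             if nxt is None:
--                 nxt = len(nodes)
--                 nodes[cur] = ({**children, ch: nxt}, term)
--                 nodes.append(({}, None))
--             cur = nxt
--         children, _ = nodes[cur]
--         nodes[cur] = (children, digit)
--     return nodes
--
--
-- _TRIE = _build_trie()
--
--
-- def _scan(part: str) -> str:
--     out = []
--     i = 0
--     n = len(part)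
--     while i < n:
--         # walk the trie from i, remembering the last terminal node (longest match)
--         node = 0
--         j = i
--         best = None
--         while j < n:
--             nxt = _TRIE[node][0].get(part[j])
--             if nxt is None:
--                 break
--             node = nxt
--             j += 1
--             d = _TRIE[node][1]
--             if d is not None:
--                 best = (j, d)
--         if best is not None:
--             out.append(best[1])
--             i = best[0]
--         else:
--             if part[i].isdigit():
--                 out.append(part[i])
--             i += 1
--     return "".join(out)
--
--
-- def _words_to_digits(text: str) -> str:
--     return "".join(_scan(part) for part in text.lower().strip().split())
-- ===== Notes on version B (the rewrite author's own statement) =====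
-- stated objective: faster
-- what changed: B builds a character trie (flat node table) from the word map once and converts each token with a single greedy trie walk per position that tracks the last terminal node (longest match), replacing A's three per-token branches and its inner loop that re-sorts the 18-entry word map and tests startswith for every word at every position.
import Mathlib
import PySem

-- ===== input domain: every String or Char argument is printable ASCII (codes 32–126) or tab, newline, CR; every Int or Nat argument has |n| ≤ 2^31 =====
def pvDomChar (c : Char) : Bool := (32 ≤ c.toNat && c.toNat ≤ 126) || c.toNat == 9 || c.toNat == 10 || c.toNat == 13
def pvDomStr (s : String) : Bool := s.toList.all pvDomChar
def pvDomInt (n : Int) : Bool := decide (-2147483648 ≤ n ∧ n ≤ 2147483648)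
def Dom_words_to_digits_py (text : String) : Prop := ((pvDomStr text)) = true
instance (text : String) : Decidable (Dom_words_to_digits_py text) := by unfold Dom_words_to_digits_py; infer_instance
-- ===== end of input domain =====

-- B: a character trie (flat node table) built once from the word map; each token is one
-- greedy trie walk per position tracking the last terminal node (longest match), replacing
-- A's per-token fast paths and its inner scan over the re-sorted word list (objective: faster,
-- constant-factor: a timing run measured B faster on the generated inputs).

set_option maxRecDepth 16384


-- ===== PORT A =====
-- word_map, in Python insertion order
def pvWordItems : List (List Char × Char) :=
  [("zero".toList, '0'), ("oh".toList, '0'),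
   ("one".toList, '1'), ("won".toList, '1'),
   ("two".toList, '2'), ("to".toList, '2'), ("too".toList, '2'),
   ("three".toList, '3'), ("tree".toList, '3'),
   ("four".toList, '4'), ("for".toList, '4'),
   ("five".toList, '5'),
   ("six".toList, '6'), ("sex".toList, '6'),
   ("seven".toList, '7'),
   ("eight".toList, '8'), ("ate".toList, '8'),
   ("nine".toList, '9')]

def pvWordMap : PySem.Dict (List Char) Char := PySem.Dict.ofList pvWordItems

-- sorted(word_map.items(), key=lambda x: -len(x[0]))
def pvWordsSorted : List (List Char × Char) :=
  PySem.List.sorted pvWordMap.items (fun x => -(x.1.length : Int))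

-- the inner 'for word, digit in sorted(...): ... break' loop
def pvFindWord : List (List Char × Char) → List Char → Option (List Char × Char)
  | [], _ => none
  | (w, d) :: rest, s =>
    if PySem.Chars.startswith s w then some (w, d) else pvFindWord rest s

-- termination facts for the while loop: a matched word is nonempty
theorem pvFindWord_mem : ∀ (l : List (List Char × Char)) (s w : List Char) (d : Char),
    pvFindWord l s = some (w, d) → (w, d) ∈ l := by
  intro l
  induction l with
  | nil => intro s w d h; cases h
  | cons p rest ih =>
    intro s w d h
    obtain ⟨pw, pd⟩ := p
    by_cases hsw : PySem.Chars.startswith s pw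
    · simp [pvFindWord, hsw] at h
      simp [h.1, h.2]
    · simp [pvFindWord, hsw] at h
      exact List.mem_cons_of_mem _ (ih s w d h)

theorem pvWordsSorted_pos : ∀ p ∈ pvWordsSorted, 0 < p.1.length := by decide

-- the 'while i < len(part)' loop, state (i, converted)
def pvALoop (part : List Char) (i : Nat) (conv : List Char) : List Char :=
  if hlt : i < part.length then
    match hfw : pvFindWord pvWordsSorted (PySem.List.slice part (some (i : Int)) none) with
    | some (w, d) => pvALoop part (i + w.length) (conv ++ [d])
    | none =>
      match PySem.List.pyGet? part (i : Int) with
      | some c =>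
        if PySem.Chars.isdigit c then pvALoop part (i + 1) (conv ++ [c])
        else pvALoop part (i + 1) conv
      | none => conv  -- unreachable: i < len(part)
  else conv
termination_by part.length - i
decreasing_by
  · have := pvWordsSorted_pos _ (pvFindWord_mem _ _ _ _ hfw)
    simp at this; omega
  · omega
  · omega

def words_to_digits_py (text : String) : String :=
  let parts := PySem.Chars.split₀ (PySem.Chars.strip (PySem.Chars.lower text.toList))
  let result := parts.foldl (fun result part =>
    match PySem.Dict.get? pvWordMap part with
    | some d => result ++ [[d]]
    | none =>
      if PySem.Chars.strIsdigit part then result ++ [part]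
      else result ++ [pvALoop part 0 []]) []
  String.ofList (PySem.Chars.join [] result)

-- ===== PORT B =====
-- _build_trie: nodes[k] = (children dict char -> node index, terminal digit or none);
-- Python's nodes[cur] read / nodes[cur] = … write become getD / List.set (cur is always in range)
def pvInsertChar (st : List (PySem.Dict Char Nat × Option Char) × Nat) (ch : Char) :
    List (PySem.Dict Char Nat × Option Char) × Nat :=
  let nodes := st.1
  let cur := st.2
  let node := nodes.getD cur (PySem.Dict.ofList [], none)
  match PySem.Dict.get? node.1 ch with
  | some nxt => (nodes, nxt)
  | none =>
      let nxt := nodes.length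
      (nodes.set cur (node.1.insert ch nxt, node.2) ++ [(PySem.Dict.ofList [], none)], nxt)

def pvInsertWord (nodes : List (PySem.Dict Char Nat × Option Char)) (wd : List Char × Char) :
    List (PySem.Dict Char Nat × Option Char) :=
  let st := wd.1.foldl pvInsertChar (nodes, 0)
  let node := st.1.getD st.2 (PySem.Dict.ofList [], none)
  st.1.set st.2 (node.1, some wd.2)

def pvTrie : List (PySem.Dict Char Nat × Option Char) :=
  pvWordItems.foldl pvInsertWord [(PySem.Dict.ofList [], none)]

-- the inner 'while j < n' trie walk, state (node, j, best); the fuel argument is the loop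
-- bound n - j (the walk advances j by 1 per iteration), making the recursion structural
def pvWalk (part : List Char) : Nat → Nat → Nat → Option (Nat × Char) → Option (Nat × Char)
  | 0, _, _, best => best
  | fuel + 1, node, j, best =>
    if j < part.length then
      match PySem.List.pyGet? part (j : Int) with
      | some c =>
        match PySem.Dict.get? (pvTrie.getD node (PySem.Dict.ofList [], none)).1 c with
        | none => best
        | some nxt =>
          match (pvTrie.getD nxt (PySem.Dict.ofList [], none)).2 with
          | some d => pvWalk part fuel nxt (j + 1) (some (j + 1, d))
          | none => pvWalk part fuel nxt (j + 1) best
      | none => best  -- unreachable: j < len(part)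
    else best

-- the outer 'while i < n' loop of _scan, state (i, out); fuel = the loop bound n - i
-- (each iteration advances i by at least 1)
def pvBLoop (part : List Char) : Nat → Nat → List Char → List Char
  | 0, _, out => out
  | fuel + 1, i, out =>
    if i < part.length then
      match pvWalk part (part.length - i) 0 i none with
      | some (e, d) => pvBLoop part fuel e (out ++ [d])
      | none =>
        match PySem.List.pyGet? part (i : Int) with
        | some c =>
          if PySem.Chars.isdigit c then pvBLoop part fuel (i + 1) (out ++ [c])
          else pvBLoop part fuel (i + 1) out
        | none => out  -- unreachable: i < len(part)
    else out

def words_to_digits_py_alt (text : String) : String :=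
  let parts := PySem.Chars.split₀ (PySem.Chars.strip (PySem.Chars.lower text.toList))
  String.ofList (PySem.Chars.join [] (parts.map (fun part => pvBLoop part part.length 0 [])))

-- ===== PRECONDITION & SPEC =====
def Spec_words_to_digits_py (text : String) (out : String) : Prop := out = words_to_digits_py_alt text
instance (text : String) (out : String) : Decidable (Spec_words_to_digits_py text out) := by unfold Spec_words_to_digits_py; infer_instance

-- ===== CLAIM (what is proved, stated in full; the proofs are below) =====
def Claim_equal_words_to_digits_py : Prop := ∀ (text : String), Dom_words_to_digits_py text → Spec_words_to_digits_py text (words_to_digits_py text)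

-- ===== LEMMAS AND PROOFS =====

-- longest-match reference: pvBestExt p s = some (k, d) iff k is the largest 1 ≤ k ≤ |s|
-- with p ++ s.take k a key of the word map, carrying its digit
def pvBestExt (p : List Char) : List Char → Option (Nat × Char)
  | [] => none
  | c :: rest =>
    match pvBestExt (p ++ [c]) rest with
    | some (k, d) => some (k + 1, d)
    | none =>
      match PySem.Dict.get? pvWordMap (p ++ [c]) with
      | some d => some (1, d)
      | none => none

theorem pvBestExt_none : ∀ (s p : List Char), pvBestExt p s = none ↔
    ∀ k, 1 ≤ k → k ≤ s.length → PySem.Dict.get? pvWordMap (p ++ s.take k) = none := by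
  intro s
  induction s with
  | nil =>
    intro p
    constructor
    · intro _ k h1 h2
      simp at h2
      omega
    · intro _
      rfl
  | cons c rest ih =>
    intro p
    constructor
    · intro h k h1 h2
      cases hbe : pvBestExt (p ++ [c]) rest with
      | some kd =>
        exfalso
        obtain ⟨k0, d0⟩ := kd
        simp [pvBestExt, hbe] at h
      | none =>
        cases hg : PySem.Dict.get? pvWordMap (p ++ [c]) with
        | some d0 =>
          exfalso
          simp [pvBestExt, hbe, hg] at h
        | none =>
          obtain ⟨k', rfl⟩ : ∃ k', k = k' + 1 := ⟨k - 1, by omega⟩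
          rw [List.take_succ_cons]
          by_cases hk0 : k' = 0
          · subst hk0
            simpa using hg
          · have := (ih (p ++ [c])).mp hbe k' (by omega) (by simp at h2; omega)
            simpa [List.append_assoc] using this
    · intro h
      have h0 : PySem.Dict.get? pvWordMap (p ++ [c]) = none := by
        have := h 1 (by omega) (by simp)
        simpa using this
      have hrest : pvBestExt (p ++ [c]) rest = none := by
        refine (ih (p ++ [c])).mpr ?_
        intro k h1 h2
        have := h (k + 1) (by omega) (by simp; omega)
        rw [List.take_succ_cons] at this
        simpa [List.append_assoc] using this
      simp [pvBestExt, hrest, h0]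

theorem pvBestExt_some : ∀ (s p : List Char) (k : Nat) (d : Char),
    pvBestExt p s = some (k, d) →
    1 ≤ k ∧ k ≤ s.length ∧ PySem.Dict.get? pvWordMap (p ++ s.take k) = some d ∧
    ∀ k', k < k' → k' ≤ s.length → PySem.Dict.get? pvWordMap (p ++ s.take k') = none := by
  intro s
  induction s with
  | nil =>
    intro p k d h
    simp [pvBestExt] at h
  | cons c rest ih =>
    intro p k d h
    cases hbe : pvBestExt (p ++ [c]) rest with
    | some kd =>
      obtain ⟨k0, d0⟩ := kd
      simp [pvBestExt, hbe] at h
      obtain ⟨h1', h2'⟩ := h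
      subst h1'
      subst h2'
      obtain ⟨ih1, ih2, ih3, ih4⟩ := ih (p ++ [c]) k0 d0 hbe
      refine ⟨by omega, by simp; omega, ?_, ?_⟩
      · rw [List.take_succ_cons]
        simpa [List.append_assoc] using ih3
      · intro k' hk' hk'2
        obtain ⟨k'', rfl⟩ : ∃ k'', k' = k'' + 1 := ⟨k' - 1, by omega⟩
        rw [List.take_succ_cons]
        have := ih4 k'' (by omega) (by simp at hk'2; omega)
        simpa [List.append_assoc] using this
    | none =>
      cases hg : PySem.Dict.get? pvWordMap (p ++ [c]) with
      | some d0 =>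
        simp [pvBestExt, hbe, hg] at h
        obtain ⟨h1', h2'⟩ := h
        subst h1'
        subst h2'
        refine ⟨by omega, by simp, by simpa using hg, ?_⟩
        intro k' hk' hk'2
        obtain ⟨k'', rfl⟩ : ∃ k'', k' = k'' + 1 := ⟨k' - 1, by omega⟩
        rw [List.take_succ_cons]
        have := (pvBestExt_none rest (p ++ [c])).mp hbe k'' (by omega) (by simp at hk'2; omega)
        simpa [List.append_assoc] using this
      | none =>
        simp [pvBestExt, hbe, hg] at h

theorem pvBestExt_intro : ∀ (s p : List Char) (k : Nat) (d : Char),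
    1 ≤ k → k ≤ s.length → PySem.Dict.get? pvWordMap (p ++ s.take k) = some d →
    (∀ k', k < k' → k' ≤ s.length → PySem.Dict.get? pvWordMap (p ++ s.take k') = none) →
    pvBestExt p s = some (k, d) := by
  intro s
  induction s with
  | nil =>
    intro p k d h1 h2
    simp at h2
    omega
  | cons c rest ih =>
    intro p k d h1 h2 hget hmax
    obtain ⟨k', rfl⟩ : ∃ k', k = k' + 1 := ⟨k - 1, by omega⟩
    by_cases hk0 : k' = 0
    · subst hk0
      have hg : PySem.Dict.get? pvWordMap (p ++ [c]) = some d := by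
        simpa using hget
      have hrest : pvBestExt (p ++ [c]) rest = none := by
        refine (pvBestExt_none rest (p ++ [c])).mpr ?_
        intro k'' h1' h2'
        have := hmax (k'' + 1) (by omega) (by simp; omega)
        rw [List.take_succ_cons] at this
        simpa [List.append_assoc] using this
      simp [pvBestExt, hrest, hg]
    · have hbe : pvBestExt (p ++ [c]) rest = some (k', d) := by
        refine ih (p ++ [c]) k' d (by omega) (by simp at h2; omega) ?_ ?_
        · rw [List.take_succ_cons] at hget
          simpa [List.append_assoc] using hget
        · intro k'' hk'' hk''2
          have := hmax (k'' + 1) (by omega) (by simp; omega)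
          rw [List.take_succ_cons] at this
          simpa [List.append_assoc] using this
      simp [pvBestExt, hbe]

-- finite facts about the sorted word list
set_option maxRecDepth 8192 in
theorem pvSortedGet : ∀ p ∈ pvWordsSorted, PySem.Dict.get? pvWordMap p.1 = some p.2 := by decide
set_option maxRecDepth 8192 in
theorem pvSortedPairwise :
    List.Pairwise (fun a b => b.1.length ≤ a.1.length) pvWordsSorted := by decide
set_option maxRecDepth 8192 in
theorem pvItemsMemSorted : ∀ p ∈ pvWordItems, p ∈ pvWordsSorted := by decide
set_option maxRecDepth 8192 in
theorem pvKeyNondigit : ∀ p ∈ pvWordItems, (p.1.any (fun c => !PySem.Chars.isdigit c)) = true := by decide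

theorem pv_get?_mem (t : List Char) (d : Char) (h : PySem.Dict.get? pvWordMap t = some d) :
    (t, d) ∈ pvWordItems := by
  have := PySem.Dict.mem_items_of_get?_eq_some _ h
  simpa [pvWordMap] using this

-- startswith as a take test
theorem pv_sw_iff (s w : List Char) :
    PySem.Chars.startswith s w = true ↔ w.length ≤ s.length ∧ s.take w.length = w := by
  rw [PySem.Chars.startswith_iff]
  constructor
  · intro h
    exact ⟨h.length_le, ((List.prefix_iff_eq_take).mp h).symm⟩
  · intro ⟨_, h⟩
    rw [List.prefix_iff_eq_take]
    exact h.symm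

-- bridges: A's longest-first scan over the sorted list computes exactly the longest match
theorem pvFindWord_none_of_all (s : List Char) : ∀ (l : List (List Char × Char)),
    (∀ p ∈ l, PySem.Chars.startswith s p.1 = false) → pvFindWord l s = none := by
  intro l
  induction l with
  | nil => intro _; rfl
  | cons p rest ih =>
    intro h
    obtain ⟨w, d⟩ := p
    have hw := h (w, d) List.mem_cons_self
    simp only [pvFindWord]
    rw [hw]
    simpa using ih (fun q hq => h q (List.mem_cons_of_mem _ hq))

theorem pv_bridge_none (s : List Char) (h : pvBestExt [] s = none) :
    pvFindWord pvWordsSorted s = none := by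
  apply pvFindWord_none_of_all
  intro p hp
  cases hsw : PySem.Chars.startswith s p.1 with
  | false => rfl
  | true =>
    exfalso
    obtain ⟨hL, htk⟩ := (pv_sw_iff s p.1).mp hsw
    have h1 := pvWordsSorted_pos p hp
    have hnone := (pvBestExt_none s []).mp h p.1.length (by omega) hL
    rw [List.nil_append, htk, pvSortedGet p hp] at hnone
    cases hnone

theorem pv_scan (s : List Char) (k : Nat) (d : Char) (hk2 : k ≤ s.length)
    (hget : PySem.Dict.get? pvWordMap (s.take k) = some d)
    (hmax : ∀ k', k < k' → k' ≤ s.length → PySem.Dict.get? pvWordMap (s.take k') = none) :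
    ∀ (l : List (List Char × Char)),
      List.Pairwise (fun a b => b.1.length ≤ a.1.length) l →
      (∀ p ∈ l, PySem.Dict.get? pvWordMap p.1 = some p.2) →
      (s.take k, d) ∈ l →
      pvFindWord l s = some (s.take k, d) := by
  intro l
  induction l with
  | nil => intro _ _ hmem; cases hmem
  | cons p rest ih =>
    intro hpw hall hmem
    have hpw1 : ∀ q ∈ rest, q.1.length ≤ p.1.length := (List.pairwise_cons.mp hpw).1
    have hpw2 := (List.pairwise_cons.mp hpw).2
    obtain ⟨w, dw⟩ := p
    cases hsw : PySem.Chars.startswith s w with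
    | false =>
      have hmem' : (s.take k, d) ∈ rest := by
        rcases List.mem_cons.mp hmem with heq | hmem'
        · exfalso
          have hwk : List.take k s = w := congrArg Prod.fst heq
          have : PySem.Chars.startswith s (s.take k) = true := by
            rw [PySem.Chars.startswith_iff]
            exact List.take_prefix k s
          rw [hwk, hsw] at this
          cases this
        · exact hmem'
      simp only [pvFindWord]
      rw [hsw]
      simpa using ih hpw2 (fun q hq => hall q (List.mem_cons_of_mem _ hq)) hmem'
    | true =>
      obtain ⟨hL, htk⟩ := (pv_sw_iff s w).mp hsw
      have hgw : PySem.Dict.get? pvWordMap w = some dw := hall (w, dw) List.mem_cons_self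
      have hLk : w.length = k := by
        rcases Nat.lt_trichotomy w.length k with hlt | heq | hgt
        · exfalso
          rcases List.mem_cons.mp hmem with heq | hmem'
          · have hwk : List.take k s = w := congrArg Prod.fst heq
            have : (s.take k).length = w.length := by rw [hwk]
            rw [List.length_take, Nat.min_eq_left hk2] at this
            omega
          · have h1 := hpw1 _ hmem'
            have : (s.take k).length = k := by rw [List.length_take, Nat.min_eq_left hk2]
            simp only [this] at h1
            omega
        · exact heq
        · exfalso
          have := hmax w.length hgt hL
          rw [htk, hgw] at this
          cases this
      have hw : w = s.take k := by rw [← hLk, htk]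
      have hd : dw = d := by
        rw [hw, hget] at hgw
        injection hgw with hgw
        exact hgw.symm
      simp only [pvFindWord]
      rw [hsw]
      simp [hw, hd]

theorem pv_bridge_some (s : List Char) (k : Nat) (d : Char) (h : pvBestExt [] s = some (k, d)) :
    pvFindWord pvWordsSorted s = some (s.take k, d) := by
  obtain ⟨hk1, hk2, hget, hmax⟩ := pvBestExt_some s [] k d h
  rw [List.nil_append] at hget
  have hmax' : ∀ k', k < k' → k' ≤ s.length → PySem.Dict.get? pvWordMap (s.take k') = none := by
    intro k' h1 h2
    have := hmax k' h1 h2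
    rwa [List.nil_append] at this
  exact pv_scan s k d hk2 hget hmax' pvWordsSorted pvSortedPairwise pvSortedGet
    (pvItemsMemSorted _ (pv_get?_mem _ _ hget))

-- finite facts about the built trie: node paths, terminal digits, child edges, completeness
def pvPaths : List (List Char) :=
  [[],
   ['z'], ['z', 'e'], ['z', 'e', 'r'], ['z', 'e', 'r', 'o'],
   ['o'], ['o', 'h'], ['o', 'n'], ['o', 'n', 'e'],
   ['w'], ['w', 'o'], ['w', 'o', 'n'],
   ['t'], ['t', 'w'], ['t', 'w', 'o'], ['t', 'o'], ['t', 'o', 'o'],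
   ['t', 'h'], ['t', 'h', 'r'], ['t', 'h', 'r', 'e'], ['t', 'h', 'r', 'e', 'e'],
   ['t', 'r'], ['t', 'r', 'e'], ['t', 'r', 'e', 'e'],
   ['f'], ['f', 'o'], ['f', 'o', 'u'], ['f', 'o', 'u', 'r'], ['f', 'o', 'r'],
   ['f', 'i'], ['f', 'i', 'v'], ['f', 'i', 'v', 'e'],
   ['s'], ['s', 'i'], ['s', 'i', 'x'],
   ['s', 'e'], ['s', 'e', 'x'], ['s', 'e', 'v'], ['s', 'e', 'v', 'e'], ['s', 'e', 'v', 'e', 'n'],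
   ['e'], ['e', 'i'], ['e', 'i', 'g'], ['e', 'i', 'g', 'h'], ['e', 'i', 'g', 'h', 't'],
   ['a'], ['a', 't'], ['a', 't', 'e'],
   ['n'], ['n', 'i'], ['n', 'i', 'n'], ['n', 'i', 'n', 'e']]

def pvPathOf (n : Nat) : List Char := pvPaths.getD n []

set_option maxRecDepth 8192 in
theorem pvTrie_term : ∀ n ∈ List.range 52,
    (pvTrie.getD n (PySem.Dict.ofList [], none)).2 =
      PySem.Dict.get? pvWordMap (pvPathOf n) := by decide
set_option maxRecDepth 8192 in
theorem pvTrie_child : ∀ n ∈ List.range 52,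
    ∀ cm ∈ (pvTrie.getD n (PySem.Dict.ofList [], none)).1.items,
      cm.2 < 52 ∧ pvPathOf cm.2 = pvPathOf n ++ [cm.1] := by decide
set_option maxRecDepth 8192 in
theorem pvTrie_complete : ∀ n ∈ List.range 52, ∀ w ∈ pvWordItems,
    pvPathOf n <+: w.1 → (pvPathOf n).length < w.1.length →
    (PySem.Dict.get? (pvTrie.getD n (PySem.Dict.ofList [], none)).1
      (w.1.getD (pvPathOf n).length ' ')).isSome = true := by decide

theorem pv_getD_append_cons : ∀ (p t : List Char) (c : Char),
    (p ++ c :: t).getD p.length ' ' = c := by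
  intro p
  induction p with
  | nil => intro t c; rfl
  | cons a p _ => intro t c; simp [List.getD_cons_succ]

-- the trie walk computes the longest match of the suffix, offset by j
set_option maxRecDepth 4096 in
theorem pv_walk_eq : ∀ (fuel : Nat) (part : List Char) (j n : Nat) (best : Option (Nat × Char)),
    part.length - j ≤ fuel → n < 52 →
    pvWalk part fuel n j best =
      match pvBestExt (pvPathOf n) (part.drop j) with
      | some (k, d) => some (j + k, d)
      | none => best := by
  intro fuel
  induction fuel with
  | zero =>
    intro part j n best hm hn
    rw [List.drop_eq_nil_of_le (by omega)]
    rfl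
  | succ fuel ih =>
    intro part j n best hm hn
    by_cases hlt : j < part.length
    · have hdrop : part.drop j = part[j] :: part.drop (j + 1) := List.drop_eq_getElem_cons hlt
      simp only [pvWalk]
      rw [if_pos hlt, PySem.List.pyGet?_natCast, List.getElem?_eq_getElem hlt, hdrop]
      simp only []
      cases hc : PySem.Dict.get? (pvTrie.getD n (PySem.Dict.ofList [], none)).1 part[j] with
      | none =>
        have hbe : pvBestExt (pvPathOf n) (part[j] :: part.drop (j + 1)) = none := by
          cases hbe2 : pvBestExt (pvPathOf n) (part[j] :: part.drop (j + 1)) with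
          | none => rfl
          | some kd =>
            exfalso
            obtain ⟨k, d⟩ := kd
            obtain ⟨hk1, hk2, hget, -⟩ :=
              pvBestExt_some (part[j] :: part.drop (j + 1)) (pvPathOf n) k d hbe2
            have hmemw := pv_get?_mem _ _ hget
            obtain ⟨k', rfl⟩ : ∃ k', k = k' + 1 := ⟨k - 1, by omega⟩
            rw [List.take_succ_cons] at hmemw
            have hcomp := pvTrie_complete n (List.mem_range.mpr hn) _ hmemw
              (by exact ⟨part[j] :: List.take k' (part.drop (j + 1)), rfl⟩)
              (by simp)
            dsimp only at hcomp
            rw [pv_getD_append_cons] at hcomp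
            rw [hc] at hcomp
            cases hcomp
        rw [hbe]
      | some nxt =>
        simp only []
        obtain ⟨hn52, hpath⟩ := pvTrie_child n (List.mem_range.mpr hn) (part[j], nxt)
          (PySem.Dict.mem_items_of_get?_eq_some _ hc)
        have hterm : (pvTrie.getD nxt (PySem.Dict.ofList [], none)).2 =
            PySem.Dict.get? pvWordMap (pvPathOf n ++ [part[j]]) := by
          rw [pvTrie_term nxt (List.mem_range.mpr hn52), hpath]
        have hih : ∀ b, pvWalk part fuel nxt (j + 1) b =
            match pvBestExt (pvPathOf n ++ [part[j]]) (part.drop (j + 1)) with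
            | some (k, d) => some (j + 1 + k, d)
            | none => b := by
          intro b
          rw [ih part (j + 1) nxt b (by omega) hn52, hpath]
        simp only [pvBestExt]
        cases hbe : pvBestExt (pvPathOf n ++ [part[j]]) (part.drop (j + 1)) with
        | some kd =>
          obtain ⟨k, d⟩ := kd
          rw [hterm]
          cases hg : PySem.Dict.get? pvWordMap (pvPathOf n ++ [part[j]]) with
          | some d0 =>
            simp only []
            rw [hih, hbe]
            simp only [Option.some.injEq, Prod.mk.injEq, and_true]
            omega
          | none =>
            simp only []
            rw [hih, hbe]
            simp only [Option.some.injEq, Prod.mk.injEq, and_true]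
            omega
        | none =>
          rw [hterm]
          cases hg : PySem.Dict.get? pvWordMap (pvPathOf n ++ [part[j]]) with
          | some d0 =>
            simp only []
            rw [hih, hbe]
          | none =>
            simp only []
            rw [hih, hbe]
    · simp only [pvWalk]
      rw [if_neg hlt, List.drop_eq_nil_of_le (by omega)]
      rfl

-- the common per-token reference scan
def pvRef (s : List Char) : List Char :=
  match hb : pvBestExt [] s with
  | some (k, d) => d :: pvRef (s.drop k)
  | none =>
    match s with
    | [] => []
    | c :: rest => if PySem.Chars.isdigit c then c :: pvRef rest else pvRef rest
termination_by s.length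
decreasing_by
  · obtain ⟨h1, h2, -, -⟩ := pvBestExt_some s [] k d hb
    simp only [List.length_drop]
    omega
  · simp
  · simp

theorem pvRef_nil : pvRef [] = [] := by
  rw [pvRef.eq_def]
  rfl

theorem pvRef_some (s : List Char) (k : Nat) (d : Char)
    (h : pvBestExt [] s = some (k, d)) : pvRef s = d :: pvRef (s.drop k) := by
  rw [pvRef.eq_def]
  split
  · rename_i k' d' heq
    rw [h] at heq
    simp at heq
    rw [heq.1, heq.2]
  · rename_i heq
    rw [h] at heq
    cases heq

theorem pvRef_cons_none (c : Char) (rest : List Char)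
    (h : pvBestExt [] (c :: rest) = none) :
    pvRef (c :: rest) = if PySem.Chars.isdigit c then c :: pvRef rest else pvRef rest := by
  rw [pvRef.eq_def]
  split
  · rename_i k d heq
    rw [h] at heq
    cases heq
  · rfl

set_option maxRecDepth 4096 in
theorem pv_bloop_eq : ∀ (fuel : Nat) (part : List Char) (i : Nat) (out : List Char),
    part.length - i ≤ fuel → pvBLoop part fuel i out = out ++ pvRef (part.drop i) := by
  intro fuel
  induction fuel with
  | zero =>
    intro part i out h
    rw [List.drop_eq_nil_of_le (by omega), pvRef_nil, List.append_nil]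
    rfl
  | succ fuel ih =>
    intro part i out h
    by_cases hlt : i < part.length
    · have hwalk : pvWalk part (part.length - i) 0 i none =
          match pvBestExt [] (part.drop i) with
          | some (k, d) => some (i + k, d)
          | none => none := pv_walk_eq (part.length - i) part i 0 none (le_refl _) (by omega)
      simp only [pvBLoop]
      rw [if_pos hlt, hwalk]
      cases hbe : pvBestExt [] (part.drop i) with
      | some kd =>
        obtain ⟨k, d'⟩ := kd
        simp only []
        obtain ⟨hk1, hk2, -, -⟩ := pvBestExt_some (part.drop i) [] k d' hbe
        rw [ih part (i + k) (out ++ [d']) (by simp at hk2; omega)]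
        rw [pvRef_some _ _ _ hbe, List.drop_drop]
        simp
      | none =>
        simp only []
        rw [PySem.List.pyGet?_natCast, List.getElem?_eq_getElem hlt]
        simp only []
        have hdrop : part.drop i = part[i] :: part.drop (i + 1) := List.drop_eq_getElem_cons hlt
        rw [hdrop] at hbe
        rw [hdrop, pvRef_cons_none _ _ hbe]
        by_cases hdig : PySem.Chars.isdigit part[i]
        · rw [if_pos hdig, if_pos hdig, ih part (i + 1) (out ++ [part[i]]) (by omega)]
          simp
        · rw [if_neg hdig, if_neg hdig, ih part (i + 1) out (by omega)]
    · simp only [pvBLoop]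
      rw [if_neg hlt, List.drop_eq_nil_of_le (by omega), pvRef_nil, List.append_nil]

theorem pv_aloop_eq : ∀ (m : Nat) (part : List Char) (i : Nat) (conv : List Char),
    part.length - i ≤ m → pvALoop part i conv = conv ++ pvRef (part.drop i) := by
  intro m
  induction m with
  | zero =>
    intro part i conv h
    rw [pvALoop, dif_neg (by omega), List.drop_eq_nil_of_le (by omega), pvRef_nil,
        List.append_nil]
  | succ m ih =>
    intro part i conv h
    by_cases hlt : i < part.length
    · rw [pvALoop, dif_pos hlt]
      split
      · rename_i w d heq
        rw [PySem.List.slice_from_natCast] at heq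
        cases hbe : pvBestExt [] (part.drop i) with
        | none => rw [pv_bridge_none _ hbe] at heq; cases heq
        | some kd =>
          obtain ⟨k, d'⟩ := kd
          rw [pv_bridge_some _ _ _ hbe] at heq
          simp only [Option.some.injEq, Prod.mk.injEq] at heq
          obtain ⟨h1, h2⟩ := heq
          subst h2
          obtain ⟨hk1, hk2, -, -⟩ := pvBestExt_some (part.drop i) [] k d' hbe
          have hwlen : w.length = k := by
            rw [← h1, List.length_take]
            omega
          rw [hwlen, ih part (i + k) (conv ++ [d']) (by simp at hk2; omega)]
          rw [pvRef_some _ _ _ hbe, List.drop_drop]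
          simp
      · rename_i heq
        rw [PySem.List.slice_from_natCast] at heq
        have hbe : pvBestExt [] (part.drop i) = none := by
          cases hbe2 : pvBestExt [] (part.drop i) with
          | none => rfl
          | some kd =>
            obtain ⟨k, d⟩ := kd
            rw [pv_bridge_some _ _ _ hbe2] at heq
            cases heq
        rw [PySem.List.pyGet?_natCast, List.getElem?_eq_getElem hlt]
        have hdrop : part.drop i = part[i] :: part.drop (i + 1) := List.drop_eq_getElem_cons hlt
        rw [hdrop] at hbe
        rw [hdrop, pvRef_cons_none _ _ hbe]
        split
        · rename_i c hc
          injection hc with hc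
          subst hc
          by_cases hdig : PySem.Chars.isdigit part[i]
          · rw [if_pos hdig, if_pos hdig, ih part (i + 1) (conv ++ [part[i]]) (by omega)]
            simp
          · rw [if_neg hdig, if_neg hdig, ih part (i + 1) conv (by omega)]
        · rename_i hc
          cases hc
    · rw [pvALoop, dif_neg hlt, List.drop_eq_nil_of_le (by omega), pvRef_nil, List.append_nil]

-- A's whole-word fast path: the scan yields exactly the digit
theorem pvRef_key (part : List Char) (d : Char)
    (h : PySem.Dict.get? pvWordMap part = some d) : pvRef part = [d] := by
  have hne : part ≠ [] := by
    intro hnil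
    rw [hnil] at h
    cases h
  have hbe : pvBestExt [] part = some (part.length, d) := by
    refine pvBestExt_intro part [] part.length d ?_ (le_refl _) ?_ ?_
    · cases part with
      | nil => exact absurd rfl hne
      | cons c rest => simp
    · rw [List.nil_append, List.take_length]
      exact h
    · intro k' h1 h2
      omega
  rw [pvRef_some _ _ _ hbe, List.drop_length, pvRef_nil]

theorem pvBestExt_digits (s : List Char) (h : ∀ c ∈ s, PySem.Chars.isdigit c = true) :
    pvBestExt [] s = none := by
  refine (pvBestExt_none s []).mpr ?_
  intro k h1 h2
  rw [List.nil_append]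
  cases hg : PySem.Dict.get? pvWordMap (s.take k) with
  | none => rfl
  | some d =>
    exfalso
    have hnd := pvKeyNondigit _ (pv_get?_mem _ _ hg)
    dsimp only at hnd
    simp only [List.any_eq_true, Bool.not_eq_true'] at hnd
    obtain ⟨c, hc1, hc2⟩ := hnd
    rw [h c (List.mem_of_mem_take hc1)] at hc2
    cases hc2

-- A's digit-token fast path: the scan copies the token
theorem pvRef_digits : ∀ (s : List Char), (∀ c ∈ s, PySem.Chars.isdigit c = true) →
    pvRef s = s := by
  intro s
  induction s with
  | nil => intro _; exact pvRef_nil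
  | cons c rest ih =>
    intro h
    rw [pvRef_cons_none _ _ (pvBestExt_digits _ h),
        if_pos (h c List.mem_cons_self), ih (fun x hx => h x (List.mem_cons_of_mem _ hx))]

-- A's per-token output
def pvFA (part : List Char) : List Char :=
  match PySem.Dict.get? pvWordMap part with
  | some d => [d]
  | none => if PySem.Chars.strIsdigit part then part else pvALoop part 0 []

theorem pvFA_eq (part : List Char) : pvFA part = pvBLoop part part.length 0 [] := by
  rw [pv_bloop_eq part.length part 0 [] (by omega), List.drop_zero, List.nil_append]
  unfold pvFA
  cases hg : PySem.Dict.get? pvWordMap part with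
  | some d => exact (pvRef_key part d hg).symm
  | none =>
    by_cases hdig : PySem.Chars.strIsdigit part
    · rw [if_pos hdig]
      have hall : ∀ c ∈ part, PySem.Chars.isdigit c = true := by
        have := hdig
        simp [PySem.Chars.strIsdigit] at this
        exact this.2
      exact (pvRef_digits part hall).symm
    · rw [if_neg hdig]
      rw [pv_aloop_eq part.length part 0 [] (by omega), List.drop_zero, List.nil_append]

theorem pv_top (text : String) : words_to_digits_py text = words_to_digits_py_alt text := by
  unfold words_to_digits_py words_to_digits_py_alt
  have hfun : (fun (result : List (List Char)) (part : List Char) =>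
      match PySem.Dict.get? pvWordMap part with
      | some d => result ++ [[d]]
      | none =>
        if PySem.Chars.strIsdigit part then result ++ [part]
        else result ++ [pvALoop part 0 []]) =
      (fun result part => result ++ [pvFA part]) := by
    funext result part
    unfold pvFA
    cases PySem.Dict.get? pvWordMap part with
    | some d => rfl
    | none =>
      by_cases hdig : PySem.Chars.strIsdigit part
      · rw [if_pos hdig, if_pos hdig]
      · rw [if_neg hdig, if_neg hdig]
  simp only [hfun, PySem.List.foldl_append_singleton_eq_map, List.nil_append]
  congr 1
  apply congrArg
  apply List.map_congr_left
  intro part _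
  exact pvFA_eq part

-- ===== VERDICT (by name: the statement is the Claim_ definition above) =====
theorem words_to_digits_py_spec : Claim_equal_words_to_digits_py := by
  intro text _
  unfold Spec_words_to_digits_py
  exact pv_top text
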